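-- pv_equiv track=rewrite | github.com/yubinbai/pcuva-problems | UVa 154 - Recyling/main.py | solve
-- ===== SOURCE A (Python) =====
-- from collections import Counter
--
-- INF = 1 << 31
--
-- def solve(par):
--     cities = par
--     mat = []
--     for c in cities:
--         mat.append(tuple(sorted(c)))
--     counter = Counter(mat)
--     cost = {}
--     for c1 in counter:
--         currCost = 0
--         for c2 in counter:
--             if c1 != c2:
--                 currCost += counter[c2] * sum(
--                     int(c1[i] != c2[i]) for i in range(5))
--         cost[c1] = currCost
--     minC, currMin = -1, INF
--     for c in cost:
--         if cost[c] < currMin: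
--             minC, currMin = c, cost[c]
--     i1 = mat.index(minC)
--     return i1 + 1
-- ===== SOURCE B (Python) =====
-- def solve(par):
--     mat = [tuple(sorted(c)) for c in par]
--     if len(set(mat)) <= 1:
--         # only one distinct name (or none): every pairwise cost is 0, the first city wins
--         return 1
--     n = len(mat)
--     freq = {}
--     for t in mat:
--         for i in range(5):
--             freq[(i, t[i])] = freq.get((i, t[i]), 0) + 1
--     best_i, best = -1, 1 << 31
--     for idx, t in enumerate(mat):
--         c = sum(n - freq[(i, t[i])] for i in range(5))
--         if c < best:
--             best_i, best = idx, c
--     return best_i + 1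
-- ===== Notes on version B (the rewrite author's own statement) =====
-- stated objective: alternative
-- what changed: Replaced A's all-pairs Hamming-distance loop over distinct sorted-city keys with per-position character frequency tables built in one pass (cost of a city = sum over its 5 positions of N - freq[(i, ch)]), a single scan over the cities for the minimum, and an early answer 1 when there is at most one distinct sorted name.
import Mathlib
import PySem

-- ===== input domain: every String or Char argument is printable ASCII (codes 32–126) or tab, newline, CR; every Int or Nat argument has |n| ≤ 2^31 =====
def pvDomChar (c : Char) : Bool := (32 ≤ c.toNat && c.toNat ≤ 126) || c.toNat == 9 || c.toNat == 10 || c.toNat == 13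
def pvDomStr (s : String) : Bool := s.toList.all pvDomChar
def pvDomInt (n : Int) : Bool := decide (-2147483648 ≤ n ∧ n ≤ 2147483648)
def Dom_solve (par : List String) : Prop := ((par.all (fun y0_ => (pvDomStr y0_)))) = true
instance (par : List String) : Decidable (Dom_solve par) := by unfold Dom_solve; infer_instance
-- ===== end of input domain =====

-- B replaces A's all-pairs Hamming comparison over distinct sorted keys with per-position character
-- frequency tables (cost of a city = sum over the 5 positions of N minus the frequency of its
-- character there), computed in single passes, with an early answer 1 when there is at most one
-- distinct sorted name; objective: alternative algorithm.

-- ===== PORT A =====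
def solve (par : List String) : Int :=
  let cities := par
  let mat := cities.foldl (fun acc c => acc ++ [PySem.List.sorted c.toList (fun x => x) false]) ([] : List (List Char))
  let counter := PySem.Dict.counter mat
  let cost := counter.keys.foldl (fun (d : PySem.Dict (List Char) Int) c1 =>
      let currCost := counter.keys.foldl (fun (cc : Int) c2 =>
          if c1 ≠ c2 then
            -- c1[i] != c2[i]: Python raises IndexError where pyGet? is none; such inputs are excluded by Pre_solve
            cc + counter.getD c2 0 *
              ((PySem.List.pyRange 0 5 1).map (fun i =>
                if PySem.List.pyGet? c1 i ≠ PySem.List.pyGet? c2 i then (1 : Int) else 0)).sum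
          else cc) 0
      d.insert c1 currCost) PySem.Dict.empty
  let r := cost.keys.foldl (fun (st : Option (List Char) × Int) c =>
      if cost.getD c 0 < st.2 then (some c, cost.getD c 0) else st) ((none : Option (List Char)), 2147483648)
  match r.1 with
  | some m => (((PySem.List.index? mat m).getD 0 : Nat) : Int) + 1
  | none => 0   -- Python: mat.index(-1) raises ValueError here; excluded by Pre_solve

-- ===== PORT B =====
def solve_alt (par : List String) : Int :=
  let mat := par.map (fun c => PySem.List.sorted c.toList (fun x => x) false)
  if (PySem.Set.ofList mat).length ≤ 1 then 1
  else
    let n : Int := (mat.length : Int)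
    let freq := mat.foldl (fun (d : PySem.Dict (Int × Char) Int) t =>
        (PySem.List.pyRange 0 5 1).foldl (fun (d : PySem.Dict (Int × Char) Int) i =>
          -- t[i]: Python raises IndexError where the index is out of range; excluded by Pre_solve
          d.insert (i, PySem.List.pyGetD t i ' ') (d.getD (i, PySem.List.pyGetD t i ' ') 0 + 1)) d) PySem.Dict.empty
    let r := (PySem.List.enumerate mat 0).foldl (fun (st : Int × Int) p =>
        let c := ((PySem.List.pyRange 0 5 1).map (fun i => n - freq.getD (i, PySem.List.pyGetD p.2 i ' ') 0)).sum
        if c < st.2 then (p.1, c) else st) ((-1 : Int), 2147483648)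
    r.1 + 1

-- ===== PRECONDITION & SPEC =====
-- Pre_ is exactly the set of inputs on which the Python A returns: A raises ValueError on the empty
-- list, and IndexError whenever the list has at least two distinct names after sorting and some name
-- is shorter than 5 characters (with a single distinct sorted name A never indexes the names).
def Pre_solve (par : List String) : Prop := par ≠ [] ∧
  ((∀ s ∈ par, 5 ≤ s.toList.length) ∨
    (∀ s ∈ par, ∀ t ∈ par,
      PySem.List.sorted s.toList (fun x => x) false = PySem.List.sorted t.toList (fun x => x) false))
instance (par : List String) : Decidable (Pre_solve par) := by unfold Pre_solve; infer_instance
def pvWitness_solve : List String := ["edcba", "abcdf", "abcde"]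
def Spec_solve (par : List String) (out : Int) : Prop := out = solve_alt par
instance (par : List String) (out : Int) : Decidable (Spec_solve par out) := by unfold Spec_solve; infer_instance

-- ===== CLAIM (what is proved, stated in full; the proofs are below) =====
def Claim_equal_solve : Prop := ∀ (par : List String), Dom_solve par → Pre_solve par → Spec_solve par (solve par)

-- ===== LEMMAS AND PROOFS =====

-- named pieces of the two ports (each definitionally equal to the corresponding port subterm)
def matOf (par : List String) : List (List Char) :=
  par.map (fun c => PySem.List.sorted c.toList (fun x => x) false)

def hamT (a b : List Char) : Int :=
  ((PySem.List.pyRange 0 5 1).map (fun i =>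
    if PySem.List.pyGet? a i ≠ PySem.List.pyGet? b i then (1 : Int) else 0)).sum

def costFunA (mat : List (List Char)) (c1 : List Char) : Int :=
  (PySem.Dict.counter mat).keys.foldl (fun (cc : Int) c2 =>
    if c1 ≠ c2 then cc + (PySem.Dict.counter mat).getD c2 0 * hamT c1 c2 else cc) 0

def costDict (mat : List (List Char)) : PySem.Dict (List Char) Int :=
  (PySem.Dict.counter mat).keys.foldl
    (fun (d : PySem.Dict (List Char) Int) c1 => d.insert c1 (costFunA mat c1)) PySem.Dict.empty

def solveRaw (mat : List (List Char)) : Int :=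
  match ((costDict mat).keys.foldl (fun (st : Option (List Char) × Int) c =>
      if (costDict mat).getD c 0 < st.2 then (some c, (costDict mat).getD c 0) else st)
      ((none : Option (List Char)), 2147483648)).1 with
  | some m => (((PySem.List.index? mat m).getD 0 : Nat) : Int) + 1
  | none => 0

def freqOf (mat : List (List Char)) : PySem.Dict (Int × Char) Int :=
  mat.foldl (fun (d : PySem.Dict (Int × Char) Int) t =>
      (PySem.List.pyRange 0 5 1).foldl (fun (d : PySem.Dict (Int × Char) Int) i =>
        d.insert (i, PySem.List.pyGetD t i ' ') (d.getD (i, PySem.List.pyGetD t i ' ') 0 + 1)) d) PySem.Dict.empty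

def costFunB (mat : List (List Char)) (t : List Char) : Int :=
  ((PySem.List.pyRange 0 5 1).map (fun i =>
    ((mat.length : Int)) - (freqOf mat).getD (i, PySem.List.pyGetD t i ' ') 0)).sum

def selA (mat : List (List Char)) (f : List Char → Int) : Option (List Char) × Int :=
  (PySem.List.dedup mat).foldl
    (fun (st : Option (List Char) × Int) c => if f c < st.2 then (some c, f c) else st)
    ((none : Option (List Char)), 2147483648)

def selB (mat : List (List Char)) (f : List Char → Int) : Int × Int :=
  (PySem.List.enumerate mat 0).foldl
    (fun (st : Int × Int) p => if f p.2 < st.2 then (p.1, f p.2) else st)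
    ((-1 : Int), 2147483648)

-- a dict built by inserting a key-pure value: lookup of a present key gives that value
theorem getD_foldl_insert_pure {κ ν : Type} [BEq κ] [LawfulBEq κ] [DecidableEq κ]
    (l : List κ) (f : κ → ν) (d0 : ν) (c : κ) (hc : c ∈ l) :
    (l.foldl (fun d x => d.insert x (f x)) PySem.Dict.empty).getD c d0 = f c := by
  induction l using List.reverseRecOn with
  | nil => simp at hc
  | append_singleton l x ih =>
    rw [List.foldl_append, List.foldl_cons, List.foldl_nil, PySem.Dict.getD_insert]
    by_cases h : c = x
    · simp [h]
    · simp only [if_neg h]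
      exact ih (by rcases List.mem_append.1 hc with h' | h'; exact h'; simp at h'; exact absurd h' h)

theorem counter_getD (mat : List (List Char)) (c : List Char) :
    (PySem.Dict.counter mat).getD c 0 = (mat.count c : Int) := by
  rw [PySem.Dict.counter_eq_foldl, PySem.Dict.getD_foldl_modify_add_one, PySem.Dict.getD_empty]
  simp

theorem counter_keys (mat : List (List Char)) :
    (PySem.Dict.counter mat).keys = PySem.List.dedup mat := by
  rw [PySem.Dict.counter_eq_foldl, PySem.Dict.keys_foldl_modify mat 0 (fun _ _ v => v + 1),
    PySem.List.dedup_eq_ofList]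
  exact PySem.Set.update_empty mat

-- List.count is the same under any two lawful BEq instances
theorem count_beq_irrel {α : Type} (i1 i2 : BEq α) (h1 : @LawfulBEq α i1) (h2 : @LawfulBEq α i2)
    (x : α) (l : List α) : @List.count α i1 x l = @List.count α i2 x l := by
  induction l with
  | nil => rfl
  | cons m t ih =>
    rw [@List.count_cons α i1, @List.count_cons α i2, ih]
    have : (@BEq.beq α i1 m x) = (@BEq.beq α i2 m x) := by
      by_cases h : m = x
      · subst h; rw [@beq_self_eq_true α i1 h1.toReflBEq, @beq_self_eq_true α i2 h2.toReflBEq]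
      · rw [(@beq_eq_false_iff_ne α i1 h1 _ _).2 h, (@beq_eq_false_iff_ne α i2 h2 _ _).2 h]
    rw [this]

-- a multiplicity-weighted sum over the distinct elements is the plain sum
theorem dedup_count_sum (mat : List (List Char)) (g : List Char → Int) :
    ((PySem.List.dedup mat).map (fun c => (mat.count c : Int) * g c)).sum
      = (mat.map g).sum := by
  rw [← List.sum_toFinset _ (PySem.List.nodup_dedup mat)]
  have h1 : (PySem.List.dedup mat).toFinset = mat.toFinset := by
    ext x; simp
  have h2 : (mat.map g).sum = (Multiset.map g (mat : Multiset (List Char))).sum := by simp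
  rw [h1, h2, Finset.sum_multiset_map_count]
  apply Finset.sum_congr rfl
  intro x _
  have hc : (Multiset.count x (mat : Multiset (List Char))) = mat.count x := by
    rw [Multiset.coe_count]
    exact count_beq_irrel _ _ inferInstance inferInstance x mat
  rw [hc, nsmul_eq_mul, mul_comm]

theorem hamT_self (t : List Char) : hamT t t = 0 := by
  simp [hamT, show PySem.List.pyRange 0 5 1 = [0,1,2,3,4] from by decide]

theorem freq_getD (mat : List (List Char)) (i : Int) (h0 : 0 ≤ i) (h5 : i < 5) (ch : Char) :
    (freqOf mat).getD (i, ch) 0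
      = (mat.countP (fun m => PySem.List.pyGetD m i ' ' == ch) : Int) := by
  have hstep : freqOf mat
      = (mat.flatMap (fun t => (PySem.List.pyRange 0 5 1).map (fun j => (j, PySem.List.pyGetD t j ' ')))).foldl
          (fun d k => d.insert k (d.getD k 0 + 1)) PySem.Dict.empty := by
    rw [List.foldl_flatMap]
    unfold freqOf
    apply PySem.List.foldl_congr_mem
    intro acc t _
    rw [List.foldl_map]
  rw [hstep, PySem.Dict.getD_foldl_insert_add_one, PySem.Dict.getD_empty]
  have hcnt : List.count (i, ch)
      (mat.flatMap (fun t => (PySem.List.pyRange 0 5 1).map (fun j => (j, PySem.List.pyGetD t j ' '))))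
      = mat.countP (fun m => PySem.List.pyGetD m i ' ' == ch) := by
    rw [List.count_flatMap]
    have hmap : List.map (List.count (i, ch) ∘ fun t => (PySem.List.pyRange 0 5 1).map (fun j => (j, PySem.List.pyGetD t j ' '))) mat
        = mat.map (fun t => if PySem.List.pyGetD t i ' ' == ch then 1 else 0) := by
      apply List.map_congr_left
      intro t _
      simp only [Function.comp_apply]
      rw [show PySem.List.pyRange 0 5 1 = [0,1,2,3,4] from by decide]
      interval_cases i <;> simp [List.count_cons, Prod.ext_iff]
    rw [hmap, PySem.List.sum_map_ite_one_zero_nat]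
  rw [hcnt]
  simp

-- per position: the number of cities differing from t there is N minus the frequency of t's character
theorem column_eq (mat : List (List Char)) (t : List Char)
    (hm : ∀ m ∈ mat, 5 ≤ m.length) (ht : 5 ≤ t.length) (i : Int) (h0 : 0 ≤ i) (h5 : i < 5) :
    (mat.map (fun m => if PySem.List.pyGet? t i ≠ PySem.List.pyGet? m i then (1 : Int) else 0)).sum
      = (mat.length : Int) - (freqOf mat).getD (i, PySem.List.pyGetD t i ' ') 0 := by
  rw [freq_getD mat i h0 h5]
  have hget : ∀ m : List Char, 5 ≤ m.length →
      PySem.List.pyGet? m i = some (PySem.List.pyGetD m i ' ') := by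
    intro m hlen
    rw [PySem.List.pyGetD_eq_getElem m ' ' h0 (by omega)]
    exact PySem.List.pyGet?_eq_some_getElem m h0 (by omega)
  have hmap : (mat.map (fun m => if PySem.List.pyGet? t i ≠ PySem.List.pyGet? m i then (1 : Int) else 0))
      = mat.map (fun m => if (!(PySem.List.pyGetD m i ' ' == PySem.List.pyGetD t i ' ')) = true then (1 : Int) else 0) := by
    apply List.map_congr_left
    intro m hmem
    rw [hget m (hm m hmem), hget t ht]
    by_cases h : PySem.List.pyGetD m i ' ' = PySem.List.pyGetD t i ' '
    · simp [h]
    · simp [h, Ne.symm h]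
  rw [hmap, PySem.List.sum_map_ite_one_zero]
  have hlen : mat.countP (fun m => !(PySem.List.pyGetD m i ' ' == PySem.List.pyGetD t i ' '))
      + mat.countP (fun m => PySem.List.pyGetD m i ' ' == PySem.List.pyGetD t i ' ') = mat.length := by
    rw [add_comm, List.length_eq_countP_add_countP (fun m => PySem.List.pyGetD m i ' ' == PySem.List.pyGetD t i ' ') (l := mat)]
    congr 1
    apply List.countP_congr
    intro m _
    simp
  omega

-- A's pairwise-weighted cost equals B's frequency-table cost
theorem cost_eq (mat : List (List Char)) (t : List Char)
    (hm : ∀ m ∈ mat, 5 ≤ m.length) (ht : 5 ≤ t.length) :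
    costFunA mat t = costFunB mat t := by
  unfold costFunA
  rw [counter_keys]
  rw [PySem.List.foldl_congr_mem _ _ (fun (cc : Int) c2 => cc + (mat.count c2 : Int) * hamT t c2) 0 ?hbody]
  case hbody =>
    intro cc c2 _
    by_cases h : t = c2
    · subst h
      simp [hamT_self]
    · rw [if_pos h, counter_getD]
  rw [PySem.List.foldl_add, dedup_count_sum, zero_add]
  unfold costFunB
  rw [show PySem.List.pyRange 0 5 1 = [0,1,2,3,4] from by decide]
  unfold hamT
  rw [show PySem.List.pyRange 0 5 1 = [0,1,2,3,4] from by decide]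
  simp only [List.map_cons, List.map_nil, List.sum_cons, List.sum_nil, add_zero]
  rw [PySem.List.sum_map_add_int, PySem.List.sum_map_add_int, PySem.List.sum_map_add_int,
    PySem.List.sum_map_add_int]
  rw [column_eq mat t hm ht 0 (by norm_num) (by norm_num),
      column_eq mat t hm ht 1 (by norm_num) (by norm_num),
      column_eq mat t hm ht 2 (by norm_num) (by norm_num),
      column_eq mat t hm ht 3 (by norm_num) (by norm_num),
      column_eq mat t hm ht 4 (by norm_num) (by norm_num)]

-- constant-list case: a single distinct sorted name
theorem dedup_const (mat : List (List Char)) (t0 : List Char)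
    (h : ∀ m ∈ mat, m = t0) (hne : mat ≠ []) : PySem.List.dedup mat = [t0] := by
  induction mat using List.reverseRecOn with
  | nil => exact absurd rfl hne
  | append_singleton l x ih =>
    have hx : x = t0 := h x (by simp)
    subst hx
    rcases eq_or_ne l [] with rfl | hl
    · rw [List.nil_append, PySem.List.dedup_eq_ofList]
      exact PySem.Set.ofList_eq_self_of_nodup _ (by simp)
    · rw [PySem.List.dedup_eq_ofList, PySem.Set.ofList_append_singleton,
        ← PySem.List.dedup_eq_ofList, ih (fun m hm => h m (by simp [hm])) hl]
      exact PySem.Set.add_of_mem (by simp)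

theorem costA_const (mat : List (List Char)) (t0 : List Char)
    (h : ∀ m ∈ mat, m = t0) (hne : mat ≠ []) : costFunA mat t0 = 0 := by
  unfold costFunA
  rw [counter_keys, dedup_const mat t0 h hne]
  simp

-- invariant tying A's first-strict-min over distinct keys to B's first-strict-min over positions
theorem select_inv (mat : List (List Char)) (f : List Char → Int) :
    (selA mat f).2 = (selB mat f).2
    ∧ (∀ m ∈ mat, (selA mat f).2 ≤ f m)
    ∧ (((selA mat f).1 = none ∧ (selB mat f).1 = -1)
      ∨ ∃ m k, (selA mat f).1 = some m ∧ PySem.List.index? mat m = some k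
          ∧ (selB mat f).1 = (k : Int)) := by
  induction mat using List.reverseRecOn with
  | nil => exact ⟨rfl, by simp, Or.inl ⟨rfl, rfl⟩⟩
  | append_singleton mat x ih =>
    obtain ⟨h1, h2, h3⟩ := ih
    have hdedup : PySem.List.dedup (mat ++ [x])
        = if x ∈ mat then PySem.List.dedup mat else PySem.List.dedup mat ++ [x] := by
      rw [PySem.List.dedup_eq_ofList, PySem.Set.ofList_append_singleton]
      by_cases hx : x ∈ mat
      · rw [if_pos hx, PySem.Set.add_of_mem (by rw [PySem.Set.mem_ofList]; exact hx),
          PySem.List.dedup_eq_ofList]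
      · rw [if_neg hx, PySem.Set.add_of_not_mem (by rw [PySem.Set.mem_ofList]; exact hx),
          PySem.List.dedup_eq_ofList]
    have henum : PySem.List.enumerate (mat ++ [x]) 0
        = PySem.List.enumerate mat 0 ++ [((mat.length : Int), x)] := by
      rw [PySem.List.enumerate_append]
      simp [PySem.List.enumerate_cons, PySem.List.enumerate_nil]
    have hselB : selB (mat ++ [x]) f
        = if f x < (selB mat f).2 then ((mat.length : Int), f x) else selB mat f := by
      unfold selB
      rw [henum, List.foldl_append, List.foldl_cons, List.foldl_nil]
    by_cases hx : x ∈ mat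
    · have hselA : selA (mat ++ [x]) f = selA mat f := by
        unfold selA
        rw [hdedup, if_pos hx]
      have hnotlt : ¬ (f x < (selB mat f).2) := by
        rw [← h1]; exact not_lt.2 (h2 x hx)
      have hselB' : selB (mat ++ [x]) f = selB mat f := by rw [hselB, if_neg hnotlt]
      rw [hselA, hselB']
      refine ⟨h1, ?_, ?_⟩
      · intro m hmem
        rcases List.mem_append.1 hmem with h | h
        · exact h2 m h
        · simp at h; subst h; exact h2 m hx
      · rcases h3 with ⟨ha, hb⟩ | ⟨m, k, ha, hidx, hb⟩
        · exact Or.inl ⟨ha, hb⟩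
        · refine Or.inr ⟨m, k, ha, ?_, hb⟩
          have hmem : m ∈ mat := by
            rcases (PySem.List.index?_eq_some_iff mat m k).1 hidx with ⟨pre, suf, heq, -, -⟩
            rw [heq]; simp
          rw [PySem.List.index?_append_of_mem [x] hmem]
          exact hidx
    · have hselA : selA (mat ++ [x]) f
          = if f x < (selA mat f).2 then (some x, f x) else selA mat f := by
        unfold selA
        rw [hdedup, if_neg hx, List.foldl_append, List.foldl_cons, List.foldl_nil]
      by_cases hlt : f x < (selA mat f).2
      · rw [hselA, if_pos hlt, hselB, if_pos (by rw [← h1]; exact hlt)]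
        refine ⟨rfl, ?_, ?_⟩
        · intro m hmem
          rcases List.mem_append.1 hmem with h | h
          · exact le_of_lt (lt_of_lt_of_le hlt (h2 m h))
          · simp at h; subst h; exact le_rfl
        · exact Or.inr ⟨x, mat.length, rfl,
            PySem.List.index?_append_singleton_self mat x hx, by simp⟩
      · rw [hselA, if_neg hlt, hselB, if_neg (by rw [← h1]; exact hlt)]
        refine ⟨h1, ?_, ?_⟩
        · intro m hmem
          rcases List.mem_append.1 hmem with h | h
          · exact h2 m h
          · simp at h; subst h; exact not_lt.1 hlt
        · rcases h3 with ⟨ha, hb⟩ | ⟨m, k, ha, hidx, hb⟩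
          · exact Or.inl ⟨ha, hb⟩
          · refine Or.inr ⟨m, k, ha, ?_, hb⟩
            have hmem : m ∈ mat := by
              rcases (PySem.List.index?_eq_some_iff mat m k).1 hidx with ⟨pre, suf, heq, -, -⟩
              rw [heq]; simp
            rw [PySem.List.index?_append_of_mem [x] hmem]
            exact hidx

theorem select_eq (mat : List (List Char)) (f : List Char → Int) :
    (match (selA mat f).1 with
      | some m => (((PySem.List.index? mat m).getD 0 : Nat) : Int) + 1
      | none => 0)
      = (selB mat f).1 + 1 := by
  obtain ⟨-, -, h3⟩ := select_inv mat f
  rcases h3 with ⟨ha, hb⟩ | ⟨m, k, ha, hidx, hb⟩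
  · rw [ha, hb]; norm_num
  · rw [ha, hb]
    rw [PySem.List.index?_eq_idxOf?] at hidx
    simp [hidx]

theorem solve_alt_named (par : List String) :
    solve_alt par = if (PySem.Set.ofList (matOf par)).length ≤ 1 then 1
      else (selB (matOf par) (costFunB (matOf par))).1 + 1 := rfl

theorem solve_raw (par : List String) : solve par = solveRaw (matOf par) := by
  have hmat : par.foldl (fun acc c => acc ++ [PySem.List.sorted c.toList (fun x => x) false])
      ([] : List (List Char)) = matOf par := by
    rw [PySem.List.foldl_append_singleton_eq_map]
    exact List.nil_append _
  simp only [solve]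
  rw [hmat]
  rfl

theorem costDict_keys (mat : List (List Char)) :
    (costDict mat).keys = PySem.List.dedup mat := by
  unfold costDict
  rw [PySem.Dict.keys_foldl_insert _ (fun _ c1 => costFunA mat c1)]
  rw [show (PySem.Dict.empty : PySem.Dict (List Char) Int).keys = PySem.Set.empty from rfl]
  rw [PySem.Set.update_empty, counter_keys]
  exact PySem.Set.ofList_eq_self_of_nodup _ (PySem.List.nodup_dedup _)

theorem costDict_getD (mat : List (List Char)) (c : List Char) (hc : c ∈ PySem.List.dedup mat) :
    (costDict mat).getD c 0 = costFunA mat c := by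
  unfold costDict
  rw [counter_keys]
  exact getD_foldl_insert_pure (PySem.List.dedup mat) (costFunA mat) 0 c hc

-- single distinct sorted name: A returns 1
theorem solveRaw_const (mat : List (List Char)) (t0 : List Char)
    (h : ∀ m ∈ mat, m = t0) (hne : mat ≠ []) : solveRaw mat = 1 := by
  have hdedup := dedup_const mat t0 h hne
  have hget : (costDict mat).getD t0 0 = 0 := by
    rw [costDict_getD mat t0 (by rw [hdedup]; simp), costA_const mat t0 h hne]
  unfold solveRaw
  rw [costDict_keys, hdedup, List.foldl_cons, List.foldl_nil, hget]
  rw [if_pos (by norm_num)]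
  have hidx : PySem.List.index? mat t0 = some 0 := by
    rcases List.exists_cons_of_ne_nil hne with ⟨m0, tl, rfl⟩
    rw [h m0 (by simp)]
    simp [PySem.List.index?_eq_idxOf?, List.idxOf?, List.findIdx?_cons]
  rw [PySem.List.index?_eq_idxOf?] at hidx
  simp [hidx]

theorem solveRaw_eq (mat : List (List Char))
    (hcost : ∀ c ∈ PySem.List.dedup mat, costFunA mat c = costFunB mat c) :
    solveRaw mat = (selB mat (costFunB mat)).1 + 1 := by
  unfold solveRaw
  rw [costDict_keys]
  rw [PySem.List.foldl_congr_mem _ _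
    (fun (st : Option (List Char) × Int) c =>
      if costFunB mat c < st.2 then (some c, costFunB mat c) else st) _ ?hbody]
  case hbody =>
    intro st c hc
    rw [costDict_getD mat c hc, hcost c hc]
  exact select_eq mat (costFunB mat)

-- ===== VERDICT (by name: the statement is the Claim_ definition above) =====
theorem solve_spec : Claim_equal_solve := by
  intro par _ hpre
  unfold Spec_solve
  obtain ⟨hne, hcases⟩ := hpre
  have hmat_ne : matOf par ≠ [] := by simp [matOf, hne]
  rw [solve_raw par, solve_alt_named]
  by_cases hguard : (PySem.Set.ofList (matOf par)).length ≤ 1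
  · rw [if_pos hguard]
    have hmem0 : ∀ m ∈ matOf par, m ∈ PySem.Set.ofList (matOf par) := by
      intro m hm
      rw [PySem.Set.mem_ofList]
      exact hm
    rcases List.exists_cons_of_ne_nil hmat_ne with ⟨m0, tl, hcons⟩
    have hm0 : m0 ∈ matOf par := by rw [hcons]; simp
    rcases List.exists_cons_of_ne_nil
        (show PySem.Set.ofList (matOf par) ≠ [] from fun hmt => by
          have := hmem0 m0 hm0; rw [hmt] at this; simp at this) with ⟨t0, tl', hs⟩
    have htl' : tl' = [] := by
      cases tl' with
      | nil => rfl
      | cons a as =>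
        exfalso
        rw [hs] at hguard
        simp at hguard
    have hconst : ∀ m ∈ matOf par, m = t0 := by
      intro m hm
      have := hmem0 m hm
      rw [hs, htl'] at this
      simpa using this
    exact solveRaw_const (matOf par) t0 hconst hmat_ne
  · rw [if_neg hguard]
    have h5 : ∀ s ∈ par, 5 ≤ s.toList.length := by
      rcases hcases with h5 | hall
      · exact h5
      · exfalso
        rcases List.exists_mem_of_ne_nil par hne with ⟨s0, hs0⟩
        have hconst : ∀ m ∈ matOf par, m = PySem.List.sorted s0.toList (fun x => x) false := by
          intro m hmem
          rcases List.mem_map.1 hmem with ⟨s, hs, rfl⟩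
          exact hall s hs s0 hs0
        have := dedup_const (matOf par) _ hconst hmat_ne
        rw [PySem.List.dedup_eq_ofList] at this
        rw [this] at hguard
        simp at hguard
    have hm : ∀ m ∈ matOf par, 5 ≤ m.length := by
      intro m hmem
      rcases List.mem_map.1 hmem with ⟨s, hs, rfl⟩
      rw [PySem.List.length_sorted]
      exact h5 s hs
    exact solveRaw_eq (matOf par)
      (fun c hc => cost_eq (matOf par) c hm (hm c ((PySem.List.mem_dedup _ _).1 hc)))
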